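-- pv_equiv track=rewrite | github.com/tomKPZ/pokesprite | lz77.py | lz77_greedy
-- ===== SOURCE A (Python) =====
-- def lz77_greedy(data):
--     n = len(data)
--
--     def aux(i):
--         if i >= n:
--             return (0, None)
--         prefix = data[:i]
--         suffix = data[i:]
--         run = (0, 0)
--         for j in range(i):
--             for k in range(j, min(i, len(suffix) + j)):
--                 if prefix[k] != suffix[k - j]:
--                     break
--                 run = max(run, (k - j + 1, i - j))
--         if not run[0]:
--             size, lst = aux(i + 1)
--             return (size + 1, ((0, 0, data[i]), lst))
--
--         runlen, delta = run
--         lstlen, lst = aux(i + runlen + 1)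
--         nxt = data[i + runlen] if i + runlen < n else None
--         return (1 + lstlen, ((delta, runlen, nxt), lst))
--
--     node = aux(0)[1]
--     ans = []
--     while node is not None:
--         first, rest = node
--         ans.append(first)
--         node = rest
--     return ans
-- ===== SOURCE B (Python) =====
-- def lz77_greedy(data):
--     n = len(data)
--     index = {}  # value -> ascending list of positions already emitted
--     ans = []
--     i = 0
--     while i < n:
--         best_len = 0
--         best_delta = 0
--         for j in index.get(data[i], []):
--             limit = min(i - j, n - i)
--             l = 0
--             while l < limit and data[j + l] == data[i + l]:
--                 l += 1
--             if best_len < l: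
--                 best_len = l
--                 best_delta = i - j
--         nxt = data[i + best_len] if i + best_len < n else None
--         ans.append((best_delta, best_len, nxt))
--         for p in range(i, min(i + best_len + 1, n)):
--             index.setdefault(data[p], []).append(p)
--         i += best_len + 1
--     return ans
-- ===== Notes on version B (the rewrite author's own statement) =====
-- stated objective: faster
-- what changed: Replaced A's recursion building a hand-made linked list (converted at the end) and its O(i) scan over every previous position with nested per-character loops by an iterative loop that keeps a dict from value to its list of previous positions, so only positions whose value matches data[i] are tried and their match length is computed by one direct while loop; strict-improvement scanning in ascending position order reproduces A's longest-match / earliest-occurrence tie-break.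
import Mathlib
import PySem

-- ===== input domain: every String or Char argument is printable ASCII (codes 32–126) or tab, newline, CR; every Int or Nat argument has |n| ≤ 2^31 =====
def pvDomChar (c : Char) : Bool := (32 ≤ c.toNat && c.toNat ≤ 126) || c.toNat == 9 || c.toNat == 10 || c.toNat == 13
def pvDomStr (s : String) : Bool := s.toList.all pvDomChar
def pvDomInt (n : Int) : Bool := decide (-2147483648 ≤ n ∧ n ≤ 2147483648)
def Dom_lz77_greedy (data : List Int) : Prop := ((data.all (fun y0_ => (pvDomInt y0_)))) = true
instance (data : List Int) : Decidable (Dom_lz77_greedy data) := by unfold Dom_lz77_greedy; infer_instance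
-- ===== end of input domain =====

-- B replaces A's recursion-with-linked-list and full scan over all previous positions j by an
-- iterative loop keeping a dict from value to its previous positions, so only positions whose
-- value matches data[i] are tried (objective: faster, constant-factor on typical data).

-- ===== PORT A =====
-- Positions and run lengths are Python ints that are provably nonnegative (list indices and
-- lengths), so they are carried as Nat; tokens are emitted as Int exactly as Python does.

-- Python's max(run, cand) on int pairs (lexicographic; returns run on ties)
def pvPairMax (r c : Nat × Nat) : Nat × Nat :=
  if r.1 < c.1 ∨ (r.1 = c.1 ∧ r.2 < c.2) then c else r

-- inner loop 'for k in range(j, min(i, len(suffix)+j)): if prefix[k] != suffix[k-j]: break; run = max(run, (k-j+1, i-j))'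
-- fuel = number of remaining k values (the range is finite and known up front, so this is exact)
def pvInnerK (pre suf : List Int) (i j : Nat) : Nat → Nat → (Nat × Nat) → Nat × Nat
  | _, 0, run => run
  | k, fuel+1, run =>
    if pre.getD k 0 ≠ suf.getD (k - j) 0 then run
    else pvInnerK pre suf i j (k+1) fuel (pvPairMax run (k - j + 1, i - j))

-- the 'run' computed by A's two nested loops at position i (prefix/suffix sliced as in A)
def pvRunA (data : List Int) (i : Nat) : Nat × Nat :=
  (List.range i).foldl
    (fun run j =>
      pvInnerK (data.take i) (data.drop i) i j j (min i ((data.drop i).length + j) - j) run)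
    (0, 0)

-- A's hand-made cons cells '((delta, runlen, nxt), lst)' / None
inductive PvNode where
  | nil : PvNode
  | cons : (Int × Int × Option Int) → PvNode → PvNode
deriving DecidableEq, Repr

-- A's recursive aux(i); returns (size, node chain) exactly as the Python does
def pvAuxA (data : List Int) (n : Nat) (i : Nat) : Int × PvNode :=
  if h : n ≤ i then (0, .nil)
  else
    let run := pvRunA data i
    if run.1 = 0 then
      let r := pvAuxA data n (i + 1)
      (r.1 + 1, .cons (0, 0, some (data.getD i 0)) r.2)
    else
      let runlen := run.1
      let delta := run.2
      let r := pvAuxA data n (i + runlen + 1)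
      let nxt := if i + runlen < n then some (data.getD (i + runlen) 0) else none
      (1 + r.1, .cons ((delta : Int), (runlen : Int), nxt) r.2)
termination_by n - i
decreasing_by all_goals omega

-- the final 'while node is not None: ans.append(first); node = rest'
def pvDrain (acc : List (Int × Int × Option Int)) : PvNode → List (Int × Int × Option Int)
  | .nil => acc
  | .cons first rest => pvDrain (acc ++ [first]) rest

def lz77_greedy (data : List Int) : List (Int × Int × Option Int) :=
  pvDrain [] (pvAuxA data data.length 0).2

-- ===== PORT B =====
-- 'l = 0; while l < limit and data[j+l] == data[i+l]: l += 1'; fuel = limit - l, exact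
def pvLcp (data : List Int) (i j : Nat) : Nat → Nat → Nat
  | l, 0 => l
  | l, fuel+1 => if data.getD (j + l) 0 = data.getD (i + l) 0 then pvLcp data i j (l + 1) fuel else l

-- B's candidate scan: strict improvement keeps the earliest (largest-delta) longest match
def pvBest (data : List Int) (i n : Nat) (cands : List Nat) : Nat × Nat :=
  cands.foldl
    (fun b j =>
      let limit := min (i - j) (n - i)
      let l := pvLcp data i j 0 limit
      if b.1 < l then (l, i - j) else b)
    (0, 0)

-- 'for p in range(i, min(i+best_len+1, n)): index.setdefault(data[p], []).append(p)'
def pvUpd (data : List Int) (d : PySem.Dict Int (List Nat)) (ps : List Nat) : PySem.Dict Int (List Nat) :=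
  ps.foldl (fun d p => d.insert (data.getD p 0) (d.getD (data.getD p 0) [] ++ [p])) d

-- B's main while loop
def pvLoopB (data : List Int) (n : Nat) (i : Nat) (d : PySem.Dict Int (List Nat))
    (acc : List (Int × Int × Option Int)) : List (Int × Int × Option Int) :=
  if h : i < n then
    let best := pvBest data i n (d.getD (data.getD i 0) [])
    let nxt := if i + best.1 < n then some (data.getD (i + best.1) 0) else none
    let d' := pvUpd data d (List.range' i (min (i + best.1 + 1) n - i))
    pvLoopB data n (i + best.1 + 1) d' (acc ++ [((best.2 : Int), (best.1 : Int), nxt)])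
  else acc
termination_by n - i
decreasing_by omega

def lz77_greedy_alt (data : List Int) : List (Int × Int × Option Int) :=
  pvLoopB data data.length 0 PySem.Dict.empty []

-- ===== PRECONDITION & SPEC =====
def Spec_lz77_greedy (data : List Int) (out : List (Int × Int × Option Int)) : Prop := out = lz77_greedy_alt data
instance (data : List Int) (out : List (Int × Int × Option Int)) : Decidable (Spec_lz77_greedy data out) := by unfold Spec_lz77_greedy; infer_instance

-- ===== CLAIM (what is proved, stated in full; the proofs are below) =====
def Claim_equal_lz77_greedy : Prop := ∀ (data : List Int), Dom_lz77_greedy data → Spec_lz77_greedy data (lz77_greedy data)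

-- ===== LEMMAS AND PROOFS =====

theorem pvLcp_ge (data : List Int) (i j : Nat) : ∀ fuel l, l ≤ pvLcp data i j l fuel := by
  intro fuel
  induction fuel with
  | zero => intro l; simp [pvLcp]
  | succ m ih =>
    intro l
    simp only [pvLcp]
    split
    · exact le_trans (Nat.le_succ l) (ih (l+1))
    · exact le_refl l

theorem pvPairMax_absorb (r : Nat × Nat) (a b δ : Nat) (h : a ≤ b) :
    pvPairMax (pvPairMax r (a, δ)) (b, δ) = pvPairMax r (b, δ) := by
  rcases r with ⟨r1, r2⟩
  simp only [pvPairMax]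
  split_ifs <;> first | rfl | (simp_all; omega)

-- A's inner k-loop computes: max run with (lcp, i-j) unless the lcp stalls at the start offset
theorem pvInnerK_eq (data : List Int) (n i j : Nat) (hn : n = data.length) (hj : j < i) (hi : i < n) :
    ∀ fuel t run, t + fuel ≤ min (i - j) (n - i) →
      pvInnerK (data.take i) (data.drop i) i j (j + t) fuel run =
        (if pvLcp data i j t fuel = t then run else pvPairMax run (pvLcp data i j t fuel, i - j)) := by
  intro fuel
  induction fuel with
  | zero => intro t run _; simp [pvInnerK, pvLcp]
  | succ m ih =>
    intro t run hb
    have htake : (data.take i)[j + t]?.getD 0 = data[j + t]?.getD 0 := by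
      have h1 : j + t < i := by omega
      simp [List.getElem?_take, h1]
    have hdrop : (data.drop i)[j + t - j]?.getD 0 = data[i + t]?.getD 0 := by
      have h1 : j + t - j = t := by omega
      rw [h1]
      simp [List.getElem?_drop]
    by_cases hc : data[j + t]?.getD 0 = data[i + t]?.getD 0
    · simp only [pvInnerK, pvLcp, List.getD, htake, hdrop, hc, if_true, ne_eq,
        not_true_eq_false, if_false]
      have hrec := ih (t + 1) (pvPairMax run (j + t - j + 1, i - j)) (by omega)
      have hjt : j + t + 1 = j + (t + 1) := by omega
      rw [hjt, hrec]
      have hge := pvLcp_ge data i j m (t + 1)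
      have ht1 : j + t - j + 1 = t + 1 := by omega
      rw [ht1]
      by_cases hL : pvLcp data i j (t + 1) m = t + 1
      · rw [if_pos hL, hL, if_neg (by omega)]
      · rw [if_neg hL, if_neg (by omega), pvPairMax_absorb _ _ _ _ (by omega)]
    · simp only [pvInnerK, pvLcp, List.getD, htake, hdrop]
      split_ifs with h1 h2 <;> simp_all

-- the same at start offset 0, phrased on the range bound A uses
theorem pvInnerK_eq0 (data : List Int) (n i j : Nat) (hn : n = data.length) (hj : j < i) (hi : i < n)
    (run : Nat × Nat) :
    pvInnerK (data.take i) (data.drop i) i j j (min (i - j) (n - i)) run =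
      (if pvLcp data i j 0 (min (i - j) (n - i)) = 0 then run
       else pvPairMax run (pvLcp data i j 0 (min (i - j) (n - i)), i - j)) := by
  have h := pvInnerK_eq data n i j hn hj hi (min (i - j) (n - i)) 0 run (by omega)
  simpa using h

-- generic: a foldl whose step is the identity off p equals the foldl over the filter
theorem pvFoldlFilter {α : Type} (p : Nat → Bool) (f g : α → Nat → α) :
    ∀ (l : List Nat) (s : α),
      (∀ s j, j ∈ l → p j = false → f s j = s) →
      (∀ s j, j ∈ l → p j = true → f s j = g s j) →
      l.foldl f s = (l.filter p).foldl g s := by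
  intro l
  induction l with
  | nil => intro s _ _; rfl
  | cons a l ih =>
    intro s h1 h2
    by_cases hp : p a = true
    · simp only [List.foldl_cons, List.filter_cons, hp, if_true, List.foldl_cons]
      rw [h2 s a (List.mem_cons_self) hp]
      exact ih _ (fun s j hj => h1 s j (List.mem_cons_of_mem _ hj))
        (fun s j hj => h2 s j (List.mem_cons_of_mem _ hj))
    · have hp' : p a = false := by simpa using hp
      simp only [List.foldl_cons, List.filter_cons, hp', Bool.false_eq_true, if_false]
      rw [h1 s a (List.mem_cons_self) hp']
      exact ih _ (fun s j hj => h1 s j (List.mem_cons_of_mem _ hj))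
        (fun s j hj => h2 s j (List.mem_cons_of_mem _ hj))

-- the lcp of a candidate is ≥ 1, of a non-candidate is the start offset 0
theorem pvLcp_zero_iff (data : List Int) (i j lim : Nat) (hlim : 1 ≤ lim) :
    pvLcp data i j 0 lim = 0 ↔ ¬ data.getD j 0 = data.getD i 0 := by
  obtain ⟨m, rfl⟩ : ∃ m, lim = m + 1 := ⟨lim - 1, by omega⟩
  have hge := pvLcp_ge data i j m 1
  simp only [pvLcp, Nat.add_zero, List.getD]
  by_cases hc : data[j]?.getD 0 = data[i]?.getD 0
  · simp [hc]; omega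
  · simp [hc]

-- A's run equals the pvPairMax-fold over the matching previous positions
theorem pvRunA_eq_filter (data : List Int) (n i : Nat) (hn : n = data.length) (hi : i < n) :
    pvRunA data i =
      ((List.range i).filter (fun j => data.getD j 0 == data.getD i 0)).foldl
        (fun r j => pvPairMax r (pvLcp data i j 0 (min (i - j) (n - i)), i - j)) (0, 0) := by
  unfold pvRunA
  apply pvFoldlFilter
  · intro s j hj hp
    have hji : j < i := List.mem_range.mp hj
    have hlen : (data.drop i).length = n - i := by simp [hn]
    have hlim : min i ((data.drop i).length + j) - j = min (i - j) (n - i) := by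
      rw [hlen]; omega
    rw [hlim, pvInnerK_eq0 data n i j hn hji hi s]
    have h1 : 1 ≤ min (i - j) (n - i) := by omega
    rw [if_pos ((pvLcp_zero_iff data i j _ h1).mpr (by simpa using hp))]
  · intro s j hj hp
    have hji : j < i := List.mem_range.mp hj
    have hlen : (data.drop i).length = n - i := by simp [hn]
    have hlim : min i ((data.drop i).length + j) - j = min (i - j) (n - i) := by
      rw [hlen]; omega
    rw [hlim, pvInnerK_eq0 data n i j hn hji hi s]
    have h1 : 1 ≤ min (i - j) (n - i) := by omega
    have hne : ¬ pvLcp data i j 0 (min (i - j) (n - i)) = 0 := by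
      rw [pvLcp_zero_iff data i j _ h1]; simpa using hp
    rw [if_neg hne]

-- on an ascending candidate list with lcp ≥ 1, max-fold = strict-improvement fold
theorem pvPairMax_eq_strict (s c : Nat × Nat) (h : (s = (0, 0) ∧ 1 ≤ c.1) ∨ c.2 < s.2) :
    pvPairMax s c = (if s.1 < c.1 then c else s) := by
  rcases s with ⟨s1, s2⟩
  rcases c with ⟨c1, c2⟩
  simp only [pvPairMax, Prod.mk.injEq] at h ⊢
  rcases h with ⟨⟨h1, h2⟩, h3⟩ | h2 <;> split_ifs <;> first | rfl | omega

theorem pvMaxFold_eq_strict (i : Nat) (L : Nat → Nat) :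
    ∀ (cs : List Nat) (s : Nat × Nat),
      cs.Pairwise (· < ·) → (∀ j ∈ cs, j < i) → (∀ j ∈ cs, 1 ≤ L j) →
      (s = (0, 0) ∨ ∀ j ∈ cs, i - j < s.2) →
      cs.foldl (fun r j => pvPairMax r (L j, i - j)) s =
      cs.foldl (fun b j => if b.1 < L j then (L j, i - j) else b) s := by
  intro cs
  induction cs with
  | nil => intro s _ _ _ _; rfl
  | cons a cs ih =>
    intro s hpw hlt hL hs
    have ha : a < i := hlt a List.mem_cons_self
    have hLa : 1 ≤ L a := hL a List.mem_cons_self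
    have hstep : pvPairMax s (L a, i - a) = (if s.1 < L a then (L a, i - a) else s) := by
      apply pvPairMax_eq_strict
      rcases hs with rfl | hs
      · exact Or.inl ⟨rfl, hLa⟩
      · exact Or.inr (hs a List.mem_cons_self)
    simp only [List.foldl_cons, hstep]
    have hpw' := (List.pairwise_cons.mp hpw).2
    have halt := (List.pairwise_cons.mp hpw).1
    by_cases hup : s.1 < L a
    · rw [if_pos hup]
      exact ih (L a, i - a) hpw' (fun j hj => hlt j (List.mem_cons_of_mem _ hj))
        (fun j hj => hL j (List.mem_cons_of_mem _ hj))
        (Or.inr (fun j hj => by have := halt j hj; simp only; omega))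
    · rw [if_neg hup]
      apply ih s hpw' (fun j hj => hlt j (List.mem_cons_of_mem _ hj))
        (fun j hj => hL j (List.mem_cons_of_mem _ hj))
      rcases hs with rfl | hs
      · simp only at hup; omega
      · exact Or.inr (fun j hj => hs j (List.mem_cons_of_mem _ hj))

-- a strict-improvement fold whose first component stays 0 never moved
theorem pvFold_strict_mono {step : Nat × Nat → Nat → Nat × Nat}
    (hstep : ∀ b j, step b j = b ∨ b.1 < (step b j).1) :
    ∀ (cs : List Nat) (s : Nat × Nat), s.1 ≤ (cs.foldl step s).1 := by
  intro cs
  induction cs with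
  | nil => intro s; simp
  | cons a cs ih =>
    intro s
    simp only [List.foldl_cons]
    rcases hstep s a with he | hl
    · rw [he]; exact ih s
    · exact le_trans (Nat.le_of_lt hl) (ih _)

theorem pvBest_fst_zero {step : Nat × Nat → Nat → Nat × Nat}
    (hstep : ∀ b j, step b j = b ∨ b.1 < (step b j).1) :
    ∀ (cs : List Nat) (s : Nat × Nat), (cs.foldl step s).1 ≤ s.1 → cs.foldl step s = s := by
  intro cs
  induction cs with
  | nil => intro s _; rfl
  | cons a cs ih =>
    intro s h
    simp only [List.foldl_cons] at h ⊢
    rcases hstep s a with he | hlt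
    · rw [he] at h ⊢; exact ih s h
    · exfalso
      have := pvFold_strict_mono hstep cs (step s a)
      omega

-- the step of pvBest either keeps the state or strictly increases the kept length
theorem pvBest_step_mono (data : List Int) (i n : Nat) :
    ∀ (b : Nat × Nat) (j : Nat),
      (fun (b : Nat × Nat) (j : Nat) =>
        let limit := min (i - j) (n - i)
        let l := pvLcp data i j 0 limit
        if b.1 < l then (l, i - j) else b) b j = b ∨
      b.1 < ((fun (b : Nat × Nat) (j : Nat) =>
        let limit := min (i - j) (n - i)
        let l := pvLcp data i j 0 limit
        if b.1 < l then (l, i - j) else b) b j).1 := by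
  intro b j
  simp only
  split_ifs with h
  · exact Or.inr h
  · exact Or.inl rfl

-- dict invariant: d maps each value to the ascending list of earlier positions holding it
def pvInv (data : List Int) (d : PySem.Dict Int (List Nat)) (i : Nat) : Prop :=
  ∀ v : Int, d.getD v [] = (List.range i).filter (fun j => data.getD j 0 == v)

theorem pvUpd_inv (data : List Int) :
    ∀ (c m : Nat) (d : PySem.Dict Int (List Nat)), pvInv data d m →
      pvInv data (pvUpd data d (List.range' m c)) (m + c) := by
  intro c
  induction c with
  | zero => intro m d h; simpa [pvUpd] using h
  | succ k ih =>
    intro m d h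
    have hr : List.range' m (k + 1) = m :: List.range' (m + 1) k := by
      simp [List.range'_succ]
    rw [hr]
    have hstep : pvUpd data d (m :: List.range' (m + 1) k) =
        pvUpd data (d.insert (data.getD m 0) (d.getD (data.getD m 0) [] ++ [m])) (List.range' (m + 1) k) := rfl
    rw [hstep]
    have h' : pvInv data (d.insert (data.getD m 0) (d.getD (data.getD m 0) [] ++ [m])) (m + 1) := by
      intro v
      rw [PySem.Dict.getD_insert]
      by_cases hv : v = data.getD m 0
      · rw [if_pos hv, h, List.range_succ, List.filter_append]
        simp [hv]
      · rw [if_neg hv, h, List.range_succ, List.filter_append]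
        have hb : (data.getD m 0 == v) = false := by
          simp only [beq_eq_false_iff_ne, ne_eq]
          exact fun he => hv he.symm
        simp [hb]
        exact fun he => hv he.symm
    have hfin := ih (m + 1) _ h'
    have harith : m + 1 + k = m + (k + 1) := by omega
    rwa [harith] at hfin

-- B's best at i equals A's run at i, given the dict invariant
theorem pvBest_eq_runA (data : List Int) (n i : Nat) (d : PySem.Dict Int (List Nat))
    (hn : n = data.length) (hi : i < n) (hinv : pvInv data d i) :
    pvBest data i n (d.getD (data.getD i 0) []) = pvRunA data i := by
  rw [pvRunA_eq_filter data n i hn hi, hinv (data.getD i 0)]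
  unfold pvBest
  rw [pvMaxFold_eq_strict i (fun j => pvLcp data i j 0 (min (i - j) (n - i)))]
  · exact List.Pairwise.filter _ List.pairwise_lt_range
  · intro j hj
    exact List.mem_range.mp (List.mem_filter.mp hj).1
  · intro j hj
    have hji : j < i := List.mem_range.mp (List.mem_filter.mp hj).1
    have hp : (data.getD j 0 == data.getD i 0) = true := (List.mem_filter.mp hj).2
    have h1 : 1 ≤ min (i - j) (n - i) := by omega
    have hge := pvLcp_ge data i j (min (i - j) (n - i)) 0
    by_cases hz : pvLcp data i j 0 (min (i - j) (n - i)) = 0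
    · exact absurd ((pvLcp_zero_iff data i j _ h1).mp hz) (by simpa using hp)
    · omega
  · exact Or.inl rfl

-- A's run with zero length is exactly (0, 0)
theorem pvRunA_zero (data : List Int) (n i : Nat) (d : PySem.Dict Int (List Nat))
    (hn : n = data.length) (hi : i < n) (hinv : pvInv data d i)
    (hz : (pvRunA data i).1 = 0) : pvRunA data i = (0, 0) := by
  rw [← pvBest_eq_runA data n i d hn hi hinv] at hz ⊢
  unfold pvBest at hz ⊢
  exact pvBest_fst_zero (pvBest_step_mono data i n) _ (0, 0) (by omega)

-- main induction: B's loop produces exactly A's drained chain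
theorem pvMain (data : List Int) (n : Nat) (hn : n = data.length) :
    ∀ (fuel i : Nat), n - i ≤ fuel → ∀ (d : PySem.Dict Int (List Nat)) acc,
      (i ≤ n → pvInv data d i) →
      pvLoopB data n i d acc = pvDrain acc (pvAuxA data n i).2 := by
  intro fuel
  induction fuel with
  | zero =>
    intro i hfi d acc _
    have hge : n ≤ i := by omega
    rw [pvLoopB, pvAuxA]
    simp [Nat.not_lt.mpr hge, hge, pvDrain]
  | succ k ih =>
    intro i hfi d acc hinv
    by_cases hi : i < n
    · have hinv' := hinv (Nat.le_of_lt hi)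
      have hbest : pvBest data i n (d.getD (data.getD i 0) []) = pvRunA data i :=
        pvBest_eq_runA data n i d hn hi hinv'
      rw [pvLoopB, pvAuxA, dif_pos hi, dif_neg (by omega : ¬ n ≤ i)]
      simp only [hbest]
      by_cases hz : (pvRunA data i).1 = 0
      · have hr0 : pvRunA data i = (0, 0) := pvRunA_zero data n i d hn hi hinv' hz
        rw [if_pos hz]
        have hmin : min (i + (pvRunA data i).1 + 1) n - i = 1 := by omega
        have hupd : pvInv data (pvUpd data d (List.range' i (min (i + (pvRunA data i).1 + 1) n - i))) (i + (pvRunA data i).1 + 1) := by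
          rw [hmin, hr0]
          have := pvUpd_inv data 1 i d hinv'
          simpa using this
        rw [ih (i + (pvRunA data i).1 + 1) (by omega) _ _ (fun _ => hupd)]
        simp only [hr0, hi, if_pos, Nat.add_zero, Nat.cast_zero]
        simp [pvDrain]
      · rw [if_neg hz]
        have hupd : i + (pvRunA data i).1 + 1 ≤ n →
            pvInv data (pvUpd data d (List.range' i (min (i + (pvRunA data i).1 + 1) n - i))) (i + (pvRunA data i).1 + 1) := by
          intro hle
          have hmin : min (i + (pvRunA data i).1 + 1) n - i = (pvRunA data i).1 + 1 := by omega
          rw [hmin]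
          have := pvUpd_inv data ((pvRunA data i).1 + 1) i d hinv'
          have harith : i + ((pvRunA data i).1 + 1) = i + (pvRunA data i).1 + 1 := by omega
          rwa [harith] at this
        rw [ih (i + (pvRunA data i).1 + 1) (by omega) _ _ hupd]
        rfl
    · rw [pvLoopB, pvAuxA]
      simp [hi, Nat.le_of_not_lt hi, pvDrain]

-- ===== VERDICT (by name: the statement is the Claim_ definition above) =====
theorem lz77_greedy_spec : Claim_equal_lz77_greedy := by
  intro data _
  unfold Spec_lz77_greedy lz77_greedy lz77_greedy_alt
  rw [pvMain data data.length rfl data.length 0 (by omega) PySem.Dict.empty []]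
  intro _ v
  simp [PySem.Dict.getD_empty]
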